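-- pv_equiv track=rewrite | github.com/yannickloth/W33-Theory | scripts/derive_m12_p144_suborbits.py | cosets_right
-- ===== SOURCE A (Python) =====
-- def compose(p: tuple[int, ...], q: tuple[int, ...]) -> tuple[int, ...]:
--     # Function composition: (p∘q)(i) = p(q(i)).
--     return tuple(p[i] for i in q)
--
-- def cosets_right(
--     g_elems: list[tuple[int, ...]], h_elems: set[tuple[int, ...]]
-- ) -> tuple[list[tuple[int, ...]], dict[tuple[int, ...], int]]:
--     elems = sorted(g_elems)
--     h_sorted = sorted(h_elems)
--     n = len(elems[0])
--     ident = tuple(range(n))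
--
--     reps: list[tuple[int, ...]] = []
--     coset_of: dict[tuple[int, ...], int] = {}
--
--     def add_coset(rep: tuple[int, ...]) -> None:
--         idx = len(reps)
--         reps.append(rep)
--         for h in h_sorted:
--             coset_of[compose(h, rep)] = idx
--
--     # Ensure coset 0 is H itself.
--     add_coset(ident)
--     for g in elems:
--         if g in coset_of:
--             continue
--         add_coset(g)
--
--     return reps, coset_of
-- ===== SOURCE B (Python) =====
-- def compose(p, q):
--     return tuple(p[i] for i in q)
--
--
-- def cosets_right(g_elems, h_elems):
--     # Two-phase, index-free variant: discover representatives by scanning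
--     # H x reps directly (no incremental dict), then build the whole
--     # membership map in one comprehension over the finished rep list.
--     elems = sorted(g_elems)
--     h_sorted = sorted(h_elems)
--     n = len(elems[0])
--
--     reps = [tuple(range(n))]
--     for g in elems:
--         if not any(compose(h, r) == g for r in reps for h in h_sorted):
--             reps.append(g)
--
--     coset_of = {
--         compose(h, r): idx
--         for idx, r in enumerate(reps)
--         for h in h_sorted
--     }
--     return reps, coset_of
-- ===== Notes on version B (the rewrite author's own statement) =====
-- stated objective: alternative
-- what changed: Replaces the incremental closure that mutates a shared reps list and coset_of dict (using the dict as a membership index during discovery) with an index-free two-phase algorithm: phase 1 discovers representatives by testing each g directly against compose(h, r) over H x reps-so-far with no dict at all; phase 2 builds coset_of in a single dict comprehension over enumerate(reps).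
import Mathlib
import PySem

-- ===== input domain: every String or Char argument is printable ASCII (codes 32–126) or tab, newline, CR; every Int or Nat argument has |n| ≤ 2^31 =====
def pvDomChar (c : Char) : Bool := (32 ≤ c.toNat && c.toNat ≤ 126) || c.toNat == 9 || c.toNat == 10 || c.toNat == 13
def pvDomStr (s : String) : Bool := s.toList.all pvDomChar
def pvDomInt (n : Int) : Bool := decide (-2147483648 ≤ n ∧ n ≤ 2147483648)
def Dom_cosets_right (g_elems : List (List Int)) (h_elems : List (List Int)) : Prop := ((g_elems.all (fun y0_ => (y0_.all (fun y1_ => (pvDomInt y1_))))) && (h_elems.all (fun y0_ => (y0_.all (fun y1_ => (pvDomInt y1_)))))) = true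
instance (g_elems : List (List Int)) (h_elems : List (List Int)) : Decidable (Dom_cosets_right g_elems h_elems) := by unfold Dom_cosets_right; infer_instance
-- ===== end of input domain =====

-- B replaces A's incremental closure (mutable reps + dict used as a membership index during
-- discovery) by an index-free two-phase algorithm: discover reps by scanning H × reps directly,
-- then build the whole map in one pass over enumerate(reps); objective: alternative (not faster).

-- ===== PORT A =====
-- compose(p, q) = tuple(p[i] for i in q); pyGetD is exact wherever every index of q is in
-- range for p (Raise.InRange), which Pre_cosets_right guarantees for every composition executed.
def pvCompose (p q : List Int) : List Int := q.map (fun i => PySem.List.pyGetD p i 0)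

def cosets_right (g_elems : List (List Int)) (h_elems : List (List Int)) :
    List (List Int) × (List (List Int × Int)) :=
  let elems := PySem.List.sorted g_elems (fun x => x) false
  let h_sorted := PySem.List.sorted h_elems (fun x => x) false
  -- n = len(elems[0]); the getD [] default is unreachable under Pre_ (g_elems ≠ [])
  let n := ((PySem.List.pyGet? elems 0).getD []).length
  let ident := PySem.List.pyRange 0 n 1
  -- add_coset mutates (reps, coset_of); here it maps the state pair
  let addCoset : (List (List Int) × PySem.Dict (List Int) Int) → List Int →
      (List (List Int) × PySem.Dict (List Int) Int) := fun st rep =>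
    (st.1 ++ [rep],
     h_sorted.foldl (fun d h => d.insert (pvCompose h rep) (st.1.length : Int)) st.2)
  let st0 := addCoset ([], PySem.Dict.empty) ident
  let st := elems.foldl (fun st g => if st.2.contains g then st else addCoset st g) st0
  (st.1, st.2.items)

-- ===== PORT B =====
def cosets_right_alt (g_elems : List (List Int)) (h_elems : List (List Int)) :
    List (List Int) × (List (List Int × Int)) :=
  let elems := PySem.List.sorted g_elems (fun x => x) false
  let h_sorted := PySem.List.sorted h_elems (fun x => x) false
  let n := ((PySem.List.pyGet? elems 0).getD []).length
  -- phase 1: representatives, membership tested by direct scan over reps × H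
  let reps := elems.foldl (fun reps g =>
      if reps.any (fun r => h_sorted.any (fun h => pvCompose h r == g)) then reps
      else reps ++ [g]) [PySem.List.pyRange 0 n 1]
  -- phase 2: the dict comprehension over enumerate(reps)
  let coset_of := (PySem.List.enumerate reps 0).foldl
      (fun d p => h_sorted.foldl (fun d h => d.insert (pvCompose h p.2) p.1) d)
      PySem.Dict.empty
  (reps, coset_of.items)

-- ===== PRECONDITION & SPEC =====
-- Pre_ = g_elems nonempty and every index that any composition could use is in range
-- (so no IndexError is reachable). It quantifies over ALL g ∈ g_elems although A only
-- composes with the g it promotes to representatives: it therefore excludes a few inputs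
-- on which A still returns (a g with out-of-range entries that is already covered by an
-- earlier coset) — see the cite in claim.json; B returns the same value there.
def Pre_cosets_right (g_elems : List (List Int)) (h_elems : List (List Int)) : Prop :=
  g_elems ≠ [] ∧
  (∀ x ∈ h_elems, ((PySem.List.sorted g_elems (fun x => x) false).headI).length ≤ x.length) ∧
  (∀ g ∈ g_elems, ∀ i ∈ g, ∀ x ∈ h_elems, PySem.Raise.InRange x.length i)
instance (g_elems : List (List Int)) (h_elems : List (List Int)) :
    Decidable (Pre_cosets_right g_elems h_elems) := by unfold Pre_cosets_right; infer_instance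

def pvWitness_cosets_right : List (List Int) × List (List Int) :=
  ([[0, 1], [1, 0]], [[0, 1]])

def Spec_cosets_right (g_elems : List (List Int)) (h_elems : List (List Int))
    (out : List (List Int) × (List (List Int × Int))) : Prop :=
  out = cosets_right_alt g_elems h_elems
instance (g_elems : List (List Int)) (h_elems : List (List Int))
    (out : List (List Int) × (List (List Int × Int))) :
    Decidable (Spec_cosets_right g_elems h_elems out) := by unfold Spec_cosets_right; infer_instance

-- ===== CLAIM (what is proved, stated in full; the proofs are below) =====
def Claim_equal_cosets_right : Prop := ∀ (g_elems : List (List Int)) (h_elems : List (List Int)), Dom_cosets_right g_elems h_elems → Pre_cosets_right g_elems h_elems → Spec_cosets_right g_elems h_elems (cosets_right g_elems h_elems)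

-- ===== LEMMAS AND PROOFS =====

-- B's phase-2 dict, as a function of the finished rep list
def pvBuild (hs : List (List Int)) (reps : List (List Int)) : PySem.Dict (List Int) Int :=
  (PySem.List.enumerate reps 0).foldl
    (fun d p => hs.foldl (fun d h => d.insert (pvCompose h p.2) p.1) d)
    PySem.Dict.empty

theorem pv_contains_foldl (hs : List (List Int)) (rep : List Int) (v : Int)
    (d : PySem.Dict (List Int) Int) (g : List Int) :
    (hs.foldl (fun d h => d.insert (pvCompose h rep) v) d).contains g
      = (d.contains g || hs.any (fun h => pvCompose h rep == g)) := by
  induction hs generalizing d with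
  | nil => simp
  | cons h t ih =>
      simp only [List.foldl_cons, List.any_cons, ih, PySem.Dict.contains_insert]
      cases hbe : (pvCompose h rep == g)
      · have : (g == pvCompose h rep) = false := by
          simpa [BEq.comm] using hbe
        simp [this]
      · have : (g == pvCompose h rep) = true := by
          simpa [BEq.comm] using hbe
        simp [this]

theorem pvBuild_append (hs reps : List (List Int)) (rep : List Int) :
    pvBuild hs (reps ++ [rep])
      = hs.foldl (fun d h => d.insert (pvCompose h rep) (reps.length : Int))
          (pvBuild hs reps) := by
  unfold pvBuild
  rw [PySem.List.enumerate_append, List.foldl_append]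
  simp [PySem.List.enumerate_cons, PySem.List.enumerate_nil]

theorem pv_contains_build (hs reps : List (List Int)) (g : List Int) :
    (pvBuild hs reps).contains g
      = reps.any (fun r => hs.any (fun h => pvCompose h r == g)) := by
  induction reps using List.reverseRecOn with
  | nil => simp [pvBuild, PySem.List.enumerate_nil]
  | append_singleton reps rep ih =>
      rw [pvBuild_append, pv_contains_foldl, ih]
      simp

theorem pv_loop (hs elems reps : List (List Int)) :
    elems.foldl (fun st g => if st.2.contains g then st
        else (st.1 ++ [g],
          hs.foldl (fun d h => d.insert (pvCompose h g) (st.1.length : Int)) st.2))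
      (reps, pvBuild hs reps)
    = ((elems.foldl (fun reps g =>
          if reps.any (fun r => hs.any (fun h => pvCompose h r == g)) then reps
          else reps ++ [g]) reps),
       pvBuild hs (elems.foldl (fun reps g =>
          if reps.any (fun r => hs.any (fun h => pvCompose h r == g)) then reps
          else reps ++ [g]) reps)) := by
  induction elems generalizing reps with
  | nil => rfl
  | cons g t ih =>
      simp only [List.foldl_cons, pv_contains_build]
      by_cases hc : reps.any (fun r => hs.any (fun h => pvCompose h r == g)) = true
      · simp only [hc, if_pos]
        exact ih reps
      · simp only [Bool.not_eq_true] at hc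
        simp only [hc, Bool.false_eq_true, if_neg, not_false_iff]
        rw [← pvBuild_append]
        exact ih (reps ++ [g])

theorem pvBuild_singleton (hs : List (List Int)) (rep : List Int) :
    pvBuild hs [rep]
      = hs.foldl (fun d h => d.insert (pvCompose h rep) (0 : Int)) PySem.Dict.empty := by
  simp [pvBuild, PySem.List.enumerate_cons, PySem.List.enumerate_nil]

-- ===== VERDICT (by name: the statement is the Claim_ definition above) =====
theorem cosets_right_spec : Claim_equal_cosets_right := by
  intro g_elems h_elems _ _
  unfold Spec_cosets_right cosets_right cosets_right_alt
  simp only []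
  rw [show (([] : List (List Int)) ++
        [PySem.List.pyRange 0 (((PySem.List.pyGet? (PySem.List.sorted g_elems (fun x => x) false) 0).getD []).length) 1],
      (PySem.List.sorted h_elems (fun x => x) false).foldl
        (fun d h => d.insert (pvCompose h (PySem.List.pyRange 0 (((PySem.List.pyGet? (PySem.List.sorted g_elems (fun x => x) false) 0).getD []).length) 1)) (([] : List (List Int)).length : Int)) PySem.Dict.empty)
      = ([PySem.List.pyRange 0 (((PySem.List.pyGet? (PySem.List.sorted g_elems (fun x => x) false) 0).getD []).length) 1],
         pvBuild (PySem.List.sorted h_elems (fun x => x) false)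
           [PySem.List.pyRange 0 (((PySem.List.pyGet? (PySem.List.sorted g_elems (fun x => x) false) 0).getD []).length) 1])
      from by rw [pvBuild_singleton]; rfl]
  rw [pv_loop]
  rfl
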